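-- pv_equiv track=rewrite | github.com/miliar/Code_Jam_Webscraper | solutions_python/Problem_201/2376.py | get_stalls_stats
-- ===== SOURCE A (Python) =====
-- def get_stalls_stats(stalls):
--     stall_stats = []  # [-1, (0,3), (1,2), (2,1), (3,0), -1]
--     for index, item in enumerate(stalls):
--         if item:
--             stall_stats.append(None)
--             continue
--
--         left_space = 0
--         for i in range(index - 1, -1, -1):
--             if stalls[i]:
--                 break
--             left_space += 1
--
--         right_space = 0
--         for i in range(index + 1, len(stalls)):
--             if stalls[i]:
--                 break
--             right_space += 1
--
--         stall_stats.append((left_space, right_space))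
--     return stall_stats
-- ===== SOURCE B (Python) =====
-- def get_stalls_stats(stalls):
--     # Two linear passes with a running empty-run counter instead of re-scanning
--     # neighbours for each stall: O(n) instead of O(n^2).
--     lefts = []
--     c = 0
--     for occ in stalls:
--         lefts.append(c)
--         c = 0 if occ else c + 1
--     rights_rev = []
--     c = 0
--     for occ in reversed(stalls):
--         rights_rev.append(c)
--         c = 0 if occ else c + 1
--     rights = rights_rev[::-1]
--     return [None if occ else (l, r)
--             for occ, l, r in zip(stalls, lefts, rights)]
-- ===== Notes on version B (the rewrite author's own statement) =====
-- stated objective: faster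
-- what changed: Replaced the per-stall inner scans left and right with two linear passes maintaining a running empty-run counter (forward for left space, over the reversed list for right space), then zipped the results.
import Mathlib
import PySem

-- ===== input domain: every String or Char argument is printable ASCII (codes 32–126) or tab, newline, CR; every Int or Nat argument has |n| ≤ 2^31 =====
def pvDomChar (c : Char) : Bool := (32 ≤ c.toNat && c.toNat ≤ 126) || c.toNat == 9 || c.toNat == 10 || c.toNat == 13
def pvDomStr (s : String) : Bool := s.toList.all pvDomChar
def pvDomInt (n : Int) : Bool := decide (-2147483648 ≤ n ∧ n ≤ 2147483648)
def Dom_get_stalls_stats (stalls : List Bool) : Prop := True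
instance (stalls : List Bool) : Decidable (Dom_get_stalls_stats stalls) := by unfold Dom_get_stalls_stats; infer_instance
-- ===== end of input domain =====

-- B replaces A's per-stall inner scans with two linear counter passes: O(n) instead of O(n^2).


-- ===== PORT A =====
-- the inner 'for i in range(…): if stalls[i]: break; space += 1' loops (break = stop)
def aScan (stalls : List Bool) : List Int → Int → Int
  | [], space => space
  | i :: rest, space =>
      if PySem.List.pyGetD stalls i false then space
      else aScan stalls rest (space + 1)

def get_stalls_stats (stalls : List Bool) : List (Option (List Int)) :=
  (PySem.List.enumerate stalls 0).foldl
    (fun stall_stats p =>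
      if p.2 then stall_stats ++ [none]
      else stall_stats ++
        [some [aScan stalls (PySem.List.pyRange (p.1 - 1) (-1) (-1)) 0,
               aScan stalls (PySem.List.pyRange (p.1 + 1) (stalls.length : Int) 1) 0]])
    []

-- ===== PORT B =====
-- one forward pass: emit the running counter, reset it on an occupied stall
def bPass : List Bool → Int → List Int
  | [], _ => []
  | occ :: rest, c => c :: bPass rest (if occ then 0 else c + 1)

def get_stalls_stats_alt (stalls : List Bool) : List (Option (List Int)) :=
  let lefts := bPass stalls 0
  let rights := (bPass stalls.reverse 0).reverse
  (stalls.zip (lefts.zip rights)).map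
    (fun p => if p.1 then none else some [p.2.1, p.2.2])

-- ===== PRECONDITION & SPEC =====
def Spec_get_stalls_stats (stalls : List Bool) (out : List (Option (List Int))) : Prop := out = get_stalls_stats_alt stalls
instance (stalls : List Bool) (out : List (Option (List Int))) : Decidable (Spec_get_stalls_stats stalls out) := by unfold Spec_get_stalls_stats; infer_instance

-- ===== CLAIM (what is proved, stated in full; the proofs are below) =====
def Claim_equal_get_stalls_stats : Prop := ∀ (stalls : List Bool), Dom_get_stalls_stats stalls → Spec_get_stalls_stats stalls (get_stalls_stats stalls)

-- ===== LEMMAS AND PROOFS =====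

-- trailing count of empty (false) stalls, as an Int
def tf (l : List Bool) : Int := ((l.reverse.takeWhile (fun b => !b)).length : Int)
-- leading count of empty (false) stalls, as an Int
def lf (l : List Bool) : Int := ((l.takeWhile (fun b => !b)).length : Int)

theorem tf_append_singleton (l : List Bool) (b : Bool) :
    tf (l ++ [b]) = if b then 0 else tf l + 1 := by
  cases b <;> simp [tf]

theorem tf_reverse (l : List Bool) : tf l.reverse = lf l := by
  simp [tf, lf]

-- A's left inner loop counts the trailing empty run of the prefix before the index
theorem aScan_left (stalls : List Bool) (k : Nat) (hk : k ≤ stalls.length) (space : Int) :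
    aScan stalls (PySem.List.pyRange ((k : Int) - 1) (-1) (-1)) space
      = space + tf (stalls.take k) := by
  induction k generalizing space with
  | zero => simp [aScan, tf]
  | succ k ih =>
      have hklt : k < stalls.length := by omega
      rw [show ((k + 1 : Nat) : Int) - 1 = (k : Int) by push_cast; ring,
          PySem.List.pyRange_neg_one_cons (by omega : (-1 : Int) < (k : Int))]
      have htake : stalls.take (k + 1) = stalls.take k ++ [stalls[k]] :=
        List.take_succ_eq_append_getElem hklt
      rw [aScan, PySem.List.pyGetD_natCast, List.getD_eq_getElem _ _ hklt]
      by_cases hb : stalls[k] = true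
      · simp [hb, htake, tf_append_singleton]
      · simp only [hb, Bool.false_eq_true, if_false]
        rw [ih (by omega), htake, tf_append_singleton]
        simp [eq_false_of_ne_true hb]; ring

-- A's right inner loop counts the leading empty run of the suffix after the index
theorem aScan_right (stalls : List Bool) (k : Nat) (space : Int) :
    aScan stalls (PySem.List.pyRange (k : Int) (stalls.length : Int) 1) space
      = space + lf (stalls.drop k) := by
  by_cases hk : k < stalls.length
  · rw [PySem.List.pyRange_one_cons (by exact_mod_cast hk),
        List.drop_eq_getElem_cons hk, aScan, PySem.List.pyGetD_natCast,
        List.getD_eq_getElem _ _ hk]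
    by_cases hb : stalls[k] = true
    · simp [hb, lf]
    · simp only [hb, Bool.false_eq_true, if_false]
      rw [show ((k : Int) + 1) = ((k + 1 : Nat) : Int) by push_cast; ring,
          aScan_right stalls (k + 1) (space + 1)]
      simp [lf]; ring
  · rw [PySem.List.pyRange_one_eq_nil (by exact_mod_cast Nat.le_of_not_lt hk),
        List.drop_eq_nil_of_le (by omega)]
    simp [aScan, lf]
termination_by stalls.length - k

-- B's counter pass, started with the trailing empty run of the prefix already seen
theorem bPass_eq (stalls pre : List Bool) :
    bPass stalls (tf pre)
      = (List.range stalls.length).map (fun k => tf (pre ++ stalls.take k)) := by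
  induction stalls generalizing pre with
  | nil => simp [bPass]
  | cons b rest ih =>
      have hc : (if b then 0 else tf pre + 1) = tf (pre ++ [b]) := by
        rw [tf_append_singleton]
      rw [bPass, hc, ih (pre ++ [b]), List.length_cons, List.range_succ_eq_map]
      simp [Function.comp_def, List.append_assoc]

theorem bPass_nil_pre (stalls : List Bool) :
    bPass stalls 0 = (List.range stalls.length).map (fun k => tf (stalls.take k)) := by
  have := bPass_eq stalls []
  simpa [tf] using this

-- A as a map over the enumerated list
theorem get_stalls_stats_eq_map (stalls : List Bool) :
    get_stalls_stats stalls
      = (PySem.List.enumerate stalls 0).map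
          (fun p => if p.2 then none
            else some [aScan stalls (PySem.List.pyRange (p.1 - 1) (-1) (-1)) 0,
                       aScan stalls (PySem.List.pyRange (p.1 + 1) (stalls.length : Int) 1) 0]) := by
  unfold get_stalls_stats
  have h1 : (fun (acc : List (Option (List Int))) (p : Int × Bool) =>
        if p.2 then acc ++ [none]
        else acc ++
          [some [aScan stalls (PySem.List.pyRange (p.1 - 1) (-1) (-1)) 0,
                 aScan stalls (PySem.List.pyRange (p.1 + 1) (stalls.length : Int) 1) 0]])
      = fun acc p => acc ++ [if p.2 then none
            else some [aScan stalls (PySem.List.pyRange (p.1 - 1) (-1) (-1)) 0,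
                       aScan stalls (PySem.List.pyRange (p.1 + 1) (stalls.length : Int) 1) 0]] := by
    funext acc p; by_cases h : p.2 <;> simp [h]
  rw [h1]
  simp only [PySem.List.foldl_append_singleton_eq_map, List.nil_append]

theorem bPass_length (stalls : List Bool) (c : Int) : (bPass stalls c).length = stalls.length := by
  induction stalls generalizing c with
  | nil => simp [bPass]
  | cons b rest ih => simp [bPass, ih]

theorem bPass_getElem (s : List Bool) (m : Nat) (h : m < (bPass s 0).length) :
    (bPass s 0)[m] = tf (s.take m) := by
  simp [bPass_nil_pre]

theorem rights_getElem (stalls : List Bool) (k : Nat) (hk : k < stalls.length) :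
    ((bPass stalls.reverse 0).reverse)[k]'(by simp [bPass_length]; exact hk)
      = lf (stalls.drop (k + 1)) := by
  rw [List.getElem_reverse, bPass_getElem]
  rw [List.take_reverse, tf_reverse]
  congr 1
  rw [bPass_length]
  simp; omega

-- ===== VERDICT (by name: the statement is the Claim_ definition above) =====
theorem get_stalls_stats_spec : Claim_equal_get_stalls_stats := by
  intro stalls _
  unfold Spec_get_stalls_stats
  rw [get_stalls_stats_eq_map]
  unfold get_stalls_stats_alt
  apply List.ext_getElem
  · simp [PySem.List.length_enumerate, bPass_length]
  intro k hk hk'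
  have hkn : k < stalls.length := by
    simpa [PySem.List.length_enumerate] using hk
  rw [List.getElem_map, PySem.List.getElem_enumerate]
  rw [List.getElem_map, List.getElem_zip, List.getElem_zip]
  rw [bPass_getElem, rights_getElem stalls k hkn]
  simp only [zero_add]
  have hl : aScan stalls (PySem.List.pyRange ((k : Int) - 1) (-1) (-1)) 0
      = tf (stalls.take k) := by
    rw [aScan_left stalls k (le_of_lt hkn)]; ring
  have hr : aScan stalls (PySem.List.pyRange ((k : Int) + 1) (stalls.length : Int) 1) 0
      = lf (stalls.drop (k + 1)) := by
    rw [show ((k : Int) + 1) = ((k + 1 : Nat) : Int) by push_cast; ring,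
        aScan_right stalls (k + 1)]
    ring
  simp only [hl, hr]
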